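-- pv_equiv track=rewrite | github.com/huber-th/AdventOfCode | 2023/day01/day1.py | getLastWordNumberIndex
-- ===== SOURCE A (Python) =====
-- def getDigit(s):
--     if s == "one":
--         return 1
--     if s == "two":
--         return 2
--     if s == "three":
--         return 3
--     if s == "four":
--         return 4
--     if s == "five":
--         return 5
--     if s == "six":
--         return 6
--     if s == "seven":
--         return 7
--     if s == "eight":
--         return 8
--     if s == "nine":
--         return 9
--
-- def getLastWordNumberIndex(input):
--     max = -1
--     digit = 0
--     for s in ["one", "two", "three", "four", "five", "six", "seven", "eight", "nine"]:
--         v = input.rfind(s)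
--         if v > -1 and v > max:
--             max = v
--             digit = getDigit(s)
--     return [max,digit] if max > -1 else None
-- ===== SOURCE B (Python) =====
-- def getLastWordNumberIndex(input):
--     digits = {"one": 1, "two": 2, "three": 3, "four": 4, "five": 5,
--               "six": 6, "seven": 7, "eight": 8, "nine": 9}
--     best = None
--     for i in range(len(input)):
--         for word, d in digits.items():
--             if input.startswith(word, i):
--                 best = [i, d]
--     return best
-- ===== Notes on version B (the rewrite author's own statement) =====
-- stated objective: alternative
-- what changed: Replaces nine separate rfind scans (one per digit word, tracking the running maximum index) by a single forward scan over positions that tests each word with startswith at that position and keeps the last match.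
import Mathlib
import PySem

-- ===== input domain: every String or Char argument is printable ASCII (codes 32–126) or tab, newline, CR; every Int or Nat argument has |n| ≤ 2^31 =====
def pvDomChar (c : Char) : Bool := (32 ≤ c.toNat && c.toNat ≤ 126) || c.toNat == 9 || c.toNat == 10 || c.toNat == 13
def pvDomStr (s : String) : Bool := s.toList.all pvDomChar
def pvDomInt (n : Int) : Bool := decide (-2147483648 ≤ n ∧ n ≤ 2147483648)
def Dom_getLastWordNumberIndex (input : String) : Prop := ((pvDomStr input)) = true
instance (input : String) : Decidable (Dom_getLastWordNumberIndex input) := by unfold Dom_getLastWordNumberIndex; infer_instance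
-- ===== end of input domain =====

-- B replaces A's nine per-word rfind scans (running-maximum bookkeeping) by one forward
-- positional scan that tests each word with startswith at every position and keeps the
-- last match; same cost class, different algorithm (objective: alternative).

-- ===== PORT A =====
def getDigit (s : String) : Int :=
  if s = "one" then 1
  else if s = "two" then 2
  else if s = "three" then 3
  else if s = "four" then 4
  else if s = "five" then 5
  else if s = "six" then 6
  else if s = "seven" then 7
  else if s = "eight" then 8
  else if s = "nine" then 9
  else 0  -- Python's implicit `return None`; unreachable from A's call sites (s is one of the nine words)

def getLastWordNumberIndex (input : String) : Option (List Int) :=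
  let st := (["one","two","three","four","five","six","seven","eight","nine"] : List String).foldl
    (fun (st : Int × Int) (s : String) =>
      if PySem.Str.rfind input s > -1 ∧ PySem.Str.rfind input s > st.1
      then (PySem.Str.rfind input s, getDigit s) else st) (-1, 0)
  if st.1 > -1 then some [st.1, st.2] else none

-- ===== PORT B =====
-- the dict `digits` in insertion order; `digits.items()` iterates exactly this list
def altDigits : List (String × Int) :=
  [("one",1),("two",2),("three",3),("four",4),("five",5),("six",6),("seven",7),("eight",8),("nine",9)]

-- `input.startswith(word, i)` with 0 ≤ i is exactly: word is a prefix of input's tail from i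
def getLastWordNumberIndex_alt (input : String) : Option (List Int) :=
  (PySem.List.pyRange 0 (PySem.Str.len input) 1).foldl
    (fun (best : Option (List Int)) (i : Int) =>
      altDigits.foldl
        (fun (b : Option (List Int)) (wd : String × Int) =>
          if PySem.Chars.startswith (input.toList.drop i.toNat) wd.1.toList
          then some [i, wd.2] else b)
        best)
    none

-- ===== PRECONDITION & SPEC =====
def Spec_getLastWordNumberIndex (input : String) (out : Option (List Int)) : Prop := out = getLastWordNumberIndex_alt input
instance (input : String) (out : Option (List Int)) : Decidable (Spec_getLastWordNumberIndex input out) := by unfold Spec_getLastWordNumberIndex; infer_instance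

-- ===== CLAIM (what is proved, stated in full; the proofs are below) =====
def Claim_equal_getLastWordNumberIndex : Prop := ∀ (input : String), Dom_getLastWordNumberIndex input → Spec_getLastWordNumberIndex input (getLastWordNumberIndex input)

-- ===== LEMMAS AND PROOFS =====

-- word wd.1 of the table matches at position j of cs
def pvPref (cs : List Char) (w : String) (j : Nat) : Bool :=
  PySem.Chars.startswith (cs.drop j) w.toList

def pvHit (cs : List Char) (j : Nat) : Bool := altDigits.any (fun wd => pvPref cs wd.1 j)

def pvDig (cs : List Char) (j : Nat) : Option Int :=
  altDigits.foldl (fun a wd => if pvPref cs wd.1 j then some wd.2 else a) none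

def pvLast (cs : List Char) : Nat → Option Nat
  | 0 => none
  | k+1 => if pvHit cs k then some k else pvLast cs k

lemma pvPref_eq (cs : List Char) (w : String) (j : Nat) :
    pvPref cs w j = w.toList.isPrefixOf (cs.drop j) := by
  rw [Bool.eq_iff_iff]
  simp [pvPref, PySem.Chars.startswith_iff, List.isPrefixOf_iff_prefix]

lemma pvLast_none {cs : List Char} {k : Nat} (h : pvLast cs k = none) :
    ∀ j < k, pvHit cs j = false := by
  induction k with
  | zero => intro j hj; omega
  | succ k ih =>
    intro j hj
    by_cases hh : pvHit cs k = true
    · simp [pvLast, hh] at h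
    · rcases Nat.lt_succ_iff_lt_or_eq.mp hj with hj' | hj'
      · exact ih (by simpa [pvLast, hh] using h) j hj'
      · subst hj'; simpa using hh

lemma pvLast_some {cs : List Char} {k m : Nat} (h : pvLast cs k = some m) :
    m < k ∧ pvHit cs m = true ∧ ∀ j, m < j → j < k → pvHit cs j = false := by
  induction k with
  | zero => simp [pvLast] at h
  | succ k ih =>
    by_cases hh : pvHit cs k = true
    · simp [pvLast, hh] at h
      subst h
      exact ⟨Nat.lt_succ_self _, hh, fun j h1 h2 => by omega⟩
    · simp only [pvLast, hh, if_false] at h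
      obtain ⟨h1, h2, h3⟩ := ih h
      refine ⟨Nat.lt_succ_of_lt h1, h2, fun j hj1 hj2 => ?_⟩
      rcases Nat.lt_succ_iff_lt_or_eq.mp hj2 with hj' | hj'
      · exact h3 j hj1 hj'
      · subst hj'; simpa using hh

-- the pick-last fold: stays put when nothing matches
lemma pick_of_not_any {p : String × Int → Bool} {f : String × Int → Option Int} :
    ∀ (ws : List (String × Int)) (a : Option Int), ws.any p = false →
      ws.foldl (fun a wd => if p wd then f wd else a) a = a := by
  intro ws
  induction ws with
  | nil => intro a _; rfl
  | cons hd tl ih =>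
    intro a h
    simp only [List.any_cons, Bool.or_eq_false_iff] at h
    simp only [List.foldl_cons, h.1, if_false]
    exact ih a h.2

-- the pick-last fold when every match is the same element
lemma pick_of_unique {p : String × Int → Bool} {x : String × Int} :
    ∀ (ws : List (String × Int)) (a : Option Int),
      (∀ y ∈ ws, p y = true → y = x) →
      ws.foldl (fun a wd => if p wd then some wd.2 else a) a =
        if ws.any p then some x.2 else a := by
  intro ws
  induction ws with
  | nil => intro a _; simp
  | cons hd tl ih =>
    intro a h
    by_cases hp : p hd = true
    · have hx : hd = x := h hd (by simp) hp
      simp only [List.foldl_cons, hp, if_true, List.any_cons, Bool.true_or]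
      rw [ih (some hd.2) (fun y hy => h y (List.mem_cons_of_mem _ hy)), hx]
      split <;> rfl
    · have hp' : p hd = false := by simpa using hp
      simp only [List.foldl_cons, hp', List.any_cons, Bool.false_eq_true,
        if_false, Bool.false_or]
      exact ih a (fun y hy => h y (List.mem_cons_of_mem _ hy))

-- B's inner loop in terms of the pick-last fold
lemma foldl_pick (p : String × Int → Bool) (i : Int) :
    ∀ (ws : List (String × Int)) (a : Option Int) (b : Option (List Int)),
      ws.foldl (fun b wd => if p wd then some [i, wd.2] else b)
        (match a with | some d => some [i, d] | none => b)
      = match ws.foldl (fun a wd => if p wd then some wd.2 else a) a with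
        | some d => some [i, d] | none => b := by
  intro ws
  induction ws with
  | nil => intro a b; rfl
  | cons hd tl ih =>
    intro a b
    by_cases hp : p hd = true <;>
      simp only [List.foldl_cons, hp, if_true, if_false]
    · have := ih (some hd.2) b
      simpa using this
    · exact ih a b

lemma foldl_pick_none (p : String × Int → Bool) (i : Int) (ws : List (String × Int))
    (b : Option (List Int)) :
    ws.foldl (fun b wd => if p wd then some [i, wd.2] else b) b
    = match ws.foldl (fun a wd => if p wd then some wd.2 else a) none with
      | some d => some [i, d] | none => b := foldl_pick p i ws none b

lemma inner_eq (cs : List Char) (k : Nat) (b : Option (List Int)) :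
    altDigits.foldl
      (fun (b : Option (List Int)) (wd : String × Int) =>
        if PySem.Chars.startswith (cs.drop ((k : Int)).toNat) wd.1.toList
        then some [((k : Int)), wd.2] else b) b
    = match pvDig cs k with
      | some d => some [(k : Int), d] | none => b :=
  foldl_pick_none (fun wd => PySem.Chars.startswith (cs.drop ((k : Int)).toNat) wd.1.toList)
    (k : Int) altDigits b

lemma dig_isSome {cs : List Char} {j : Nat} (h : pvHit cs j = true) :
    ∃ d, pvDig cs j = some d := by
  unfold pvHit at h
  unfold pvDig
  generalize altDigits = ws at *
  induction ws with
  | nil => simp at h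
  | cons hd tl ih =>
    by_cases hp : pvPref cs hd.1 j = true
    · simp only [List.foldl_cons, hp, if_true]
      clear h ih
      have : ∀ (tl : List (String × Int)) (d : Int),
          ∃ d', tl.foldl (fun a wd => if pvPref cs wd.1 j then some wd.2 else a)
            (some d) = some d' := by
        intro tl
        induction tl with
        | nil => exact fun d => ⟨d, rfl⟩
        | cons h2 t2 ih2 =>
          intro d
          by_cases hp2 : pvPref cs h2.1 j = true <;>
            simp only [List.foldl_cons, hp2, if_true, if_false] <;> exact ih2 _
      exact this tl hd.2
    · simp only [List.any_cons, hp, Bool.false_or] at h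
      simp only [List.foldl_cons, hp, if_false]
      exact ih h

lemma dig_none {cs : List Char} {j : Nat} (h : pvHit cs j = false) :
    pvDig cs j = none := by
  unfold pvHit at h
  unfold pvDig
  exact pick_of_not_any altDigits none h

lemma B_fold (cs : List Char) : ∀ k : Nat,
    ((List.range k).map (Nat.cast : Nat → Int)).foldl
      (fun (best : Option (List Int)) (i : Int) =>
        altDigits.foldl
          (fun (b : Option (List Int)) (wd : String × Int) =>
            if PySem.Chars.startswith (cs.drop i.toNat) wd.1.toList
            then some [i, wd.2] else b)
          best)
      none
    = match pvLast cs k with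
      | some m => (match pvDig cs m with | some d => some [(m : Int), d] | none => none)
      | none => none := by
  intro k
  induction k with
  | zero => rfl
  | succ k ih =>
    rw [List.range_succ, List.map_append, List.foldl_append, ih]
    simp only [List.map_cons, List.map_nil, List.foldl_cons, List.foldl_nil]
    rw [inner_eq]
    by_cases hh : pvHit cs k = true
    · obtain ⟨d, hd⟩ := dig_isSome hh
      simp [pvLast, hh, hd]
    · have hh' : pvHit cs k = false := by simpa using hh
      rw [dig_none hh']
      simp [pvLast, hh']

-- rfind.go finds the HIGHEST j ≤ k where sub is a prefix of cs.drop j, else -1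
lemma go_spec (s sub : List Char) : ∀ k : Nat,
    (PySem.Chars.rfind.go s sub k = -1 ∧ ∀ j ≤ k, sub.isPrefixOf (s.drop j) = false)
    ∨ (∃ m : Nat, PySem.Chars.rfind.go s sub k = (m : Int) ∧ m ≤ k ∧
        sub.isPrefixOf (s.drop m) = true ∧
        ∀ j, m < j → j ≤ k → sub.isPrefixOf (s.drop j) = false) := by
  intro k
  induction k with
  | zero =>
    by_cases h : sub.isPrefixOf s = true
    · right
      exact ⟨0, by simp [PySem.Chars.rfind.go, h], le_rfl, by simpa using h,
        fun j h1 h2 => by omega⟩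
    · have h' : sub.isPrefixOf s = false := Bool.eq_false_iff.mpr h
      left
      refine ⟨by simp [PySem.Chars.rfind.go, h'], ?_⟩
      intro j hj
      interval_cases j
      simpa using h'
  | succ k ih =>
    by_cases h : sub.isPrefixOf (s.drop (k+1)) = true
    · right
      exact ⟨k+1, by simp [PySem.Chars.rfind.go, h], le_rfl, h, fun j h1 h2 => by omega⟩
    · have h' : sub.isPrefixOf (s.drop (k+1)) = false := Bool.eq_false_iff.mpr h
      have hstep : PySem.Chars.rfind.go s sub (k+1) = PySem.Chars.rfind.go s sub k := by
        simp [PySem.Chars.rfind.go, h']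
      rcases ih with ⟨h1, h2⟩ | ⟨m, h1, h2, h3, h4⟩
      · refine Or.inl ⟨hstep.trans h1, ?_⟩
        intro j hj
        rcases Nat.lt_succ_iff_lt_or_eq.mp (Nat.lt_succ_of_le hj) with h5 | h5
        · exact h2 j (by omega)
        · subst h5; exact h'
      · refine Or.inr ⟨m, hstep.trans h1, by omega, h3, ?_⟩
        intro j hj1 hj2
        rcases Nat.lt_succ_iff_lt_or_eq.mp (Nat.lt_succ_of_le hj2) with h5 | h5
        · exact h4 j hj1 (by omega)
        · subst h5; exact h'

lemma rfind_ge (s sub : List Char) (k : Nat) : -1 ≤ PySem.Chars.rfind.go s sub k := by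
  rcases go_spec s sub k with ⟨h, _⟩ | ⟨m, h, _⟩ <;> rw [h] <;> omega

-- A's fold: no word can improve the running maximum
lemma A_keep (V : String → Int) : ∀ (ws : List String) (m d : Int),
    (∀ w ∈ ws, V w ≤ m) →
    ws.foldl (fun (st : Int × Int) (s : String) =>
      if V s > -1 ∧ V s > st.1 then (V s, getDigit s) else st) (m, d) = (m, d) := by
  intro ws
  induction ws with
  | nil => intro m d _; rfl
  | cons hd tl ih =>
    intro m d h
    have hc : ¬(V hd > -1 ∧ V hd > m) := fun hc => absurd hc.2 (not_lt.mpr (h hd (by simp)))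
    simp only [List.foldl_cons, if_neg hc]
    exact ih m d (fun w hw => h w (by simp [hw]))

-- A's fold: the running maximum stays in [-1, M)
lemma A_bound (V : String → Int) (M : Int) :
    ∀ (ws : List String) (m d : Int), -1 ≤ m → m < M → (∀ w ∈ ws, V w < M) →
      -1 ≤ (ws.foldl (fun (st : Int × Int) (s : String) =>
        if V s > -1 ∧ V s > st.1 then (V s, getDigit s) else st) (m, d)).1 ∧
      (ws.foldl (fun (st : Int × Int) (s : String) =>
        if V s > -1 ∧ V s > st.1 then (V s, getDigit s) else st) (m, d)).1 < M := by
  intro ws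
  induction ws with
  | nil => intro m d h1 h2 _; exact ⟨h1, h2⟩
  | cons hd tl ih =>
    intro m d h1 h2 h3
    simp only [List.foldl_cons]
    by_cases hc : V hd > -1 ∧ V hd > m
    · rw [if_pos hc]
      exact ih (V hd) _ (le_of_lt hc.1) (h3 hd (by simp)) (fun w hw => h3 w (by simp [hw]))
    · rw [if_neg hc]
      exact ih m d h1 h2 (fun w hw => h3 w (by simp [hw]))

lemma A_main (V : String → Int) (hV : ∀ w, -1 ≤ V w) (pre post : List String)
    (w0 : String) (M : Int) (hM : -1 < M)
    (hpre : ∀ w ∈ pre, V w < M) (hw : V w0 = M) (hpost : ∀ w ∈ post, V w ≤ M) :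
    (pre ++ w0 :: post).foldl (fun (st : Int × Int) (s : String) =>
      if V s > -1 ∧ V s > st.1 then (V s, getDigit s) else st) (-1, 0) = (M, getDigit w0) := by
  rw [List.foldl_append]
  obtain ⟨hb1, hb2⟩ := A_bound V M pre (-1) 0 le_rfl hM hpre
  simp only [List.foldl_cons]
  have hc : V w0 > -1 ∧ V w0 > (pre.foldl (fun (st : Int × Int) (s : String) =>
      if V s > -1 ∧ V s > st.1 then (V s, getDigit s) else st) (-1, 0)).1 := by
    constructor
    · rw [hw]; exact hM
    · rw [hw]; exact hb2
  rw [if_pos hc, hw]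
  exact A_keep V post M (getDigit w0) hpost

-- literal facts about the nine words
lemma words_ne_nil : ∀ wd ∈ altDigits, wd.1.toList ≠ [] := by decide
lemma words_uniq : ∀ p ∈ altDigits, ∀ q ∈ altDigits, p.1.toList <+: q.1.toList → p = q := by decide
lemma words_digit : ∀ wd ∈ altDigits, getDigit wd.1 = wd.2 := by decide
lemma words_nodup : altDigits.Nodup := by decide
lemma words_map_fst : altDigits.map Prod.fst = ["one","two","three","four","five","six","seven","eight","nine"] := by decide

-- ===== VERDICT (by name: the statement is the Claim_ definition above) =====
lemma hit_of_pref {cs : List Char} {j : Nat} {wd : String × Int}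
    (hwd : wd ∈ altDigits) (h : pvPref cs wd.1 j = true) : pvHit cs j = true :=
  List.any_eq_true.mpr ⟨wd, hwd, h⟩

-- the word matching at a fixed position is unique
lemma match_unique {cs : List Char} {j : Nat} {wd : String × Int}
    (hwd : wd ∈ altDigits) (h : pvPref cs wd.1 j = true) :
    ∀ y ∈ altDigits, pvPref cs y.1 j = true → y = wd := by
  intro y hy hp
  have p1 : y.1.toList <+: cs.drop j := by
    rw [← List.isPrefixOf_iff_prefix, ← pvPref_eq]; exact hp
  have p2 : wd.1.toList <+: cs.drop j := by
    rw [← List.isPrefixOf_iff_prefix, ← pvPref_eq]; exact h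
  rcases List.prefix_or_prefix_of_prefix p1 p2 with hc | hc
  · exact words_uniq y hy wd hwd hc
  · exact (words_uniq wd hwd y hy hc).symm

theorem getLastWordNumberIndex_spec : Claim_equal_getLastWordNumberIndex := by
  intro input _
  unfold Spec_getLastWordNumberIndex
  have hB : getLastWordNumberIndex_alt input =
      (match pvLast input.toList input.toList.length with
       | some m => (match pvDig input.toList m with
                    | some d => some [(m : Int), d] | none => none)
       | none => none) := by
    unfold getLastWordNumberIndex_alt
    rw [PySem.Str.len_eq, PySem.List.pyRange_zero_nat]
    exact B_fold input.toList input.toList.length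
  rw [hB]
  have hVgo : ∀ w : String, PySem.Str.rfind input w
      = PySem.Chars.rfind.go input.toList w.toList input.toList.length := by
    intro w; rw [PySem.Str.rfind_eq]; rfl
  have hVge : ∀ w : String, -1 ≤ PySem.Str.rfind input w := by
    intro w; rw [hVgo]; exact rfind_ge _ _ _
  rcases hLast : pvLast input.toList input.toList.length with _ | M
  · -- no word occurs anywhere: every rfind is -1 and A keeps (-1, 0)
    have hnohit := pvLast_none hLast
    have hVle : ∀ w ∈ (["one","two","three","four","five","six","seven","eight","nine"] : List String),
        PySem.Str.rfind input w ≤ -1 := by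
      intro w hw
      rw [← words_map_fst] at hw
      obtain ⟨wd, hwd, rfl⟩ := List.mem_map.mp hw
      rw [hVgo]
      rcases go_spec input.toList wd.1.toList input.toList.length with ⟨h1, _⟩ | ⟨m, h1, h2, h3, _⟩
      · rw [h1]
      · exfalso
        rcases Nat.lt_or_ge m input.toList.length with hm | hm
        · have hh : pvHit input.toList m = true :=
            hit_of_pref hwd (by rw [pvPref_eq]; exact h3)
          rw [hnohit m hm] at hh
          exact Bool.false_ne_true hh
        · have hmn : m = input.toList.length := le_antisymm h2 hm
          subst hmn
          have hp : wd.1.toList <+: input.toList.drop input.toList.length :=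
            List.isPrefixOf_iff_prefix.mp h3
          rw [List.drop_length] at hp
          exact words_ne_nil wd hwd (List.prefix_nil.mp hp)
    have hkeep := A_keep (PySem.Str.rfind input)
      (["one","two","three","four","five","six","seven","eight","nine"]) (-1) 0 hVle
    simp only [getLastWordNumberIndex, hkeep]
    norm_num
  · -- M is the last position where any word matches
    obtain ⟨hMn, hhit, hafter⟩ := pvLast_some hLast
    obtain ⟨wd, hwd, hpref⟩ := List.any_eq_true.mp hhit
    have hprefP : wd.1.toList <+: input.toList.drop M := by
      rw [← List.isPrefixOf_iff_prefix, ← pvPref_eq]; exact hpref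
    have hF1 : ∀ w' ∈ altDigits, PySem.Str.rfind input w'.1 ≤ (M : Int) := by
      intro w' hw'
      rw [hVgo]
      rcases go_spec input.toList w'.1.toList input.toList.length with ⟨h1, _⟩ | ⟨m, h1, h2, h3, _⟩
      · rw [h1]; omega
      · rw [h1]
        have hmM : m ≤ M := by
          by_contra hgt
          push_neg at hgt
          rcases Nat.lt_or_ge m input.toList.length with hm | hm
          · have hh : pvHit input.toList m = true :=
              hit_of_pref hw' (by rw [pvPref_eq]; exact h3)
            rw [hafter m hgt hm] at hh
            exact Bool.false_ne_true hh
          · have hmn : m = input.toList.length := le_antisymm h2 hm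
            subst hmn
            have hp : w'.1.toList <+: input.toList.drop input.toList.length :=
              List.isPrefixOf_iff_prefix.mp h3
            rw [List.drop_length] at hp
            exact words_ne_nil w' hw' (List.prefix_nil.mp hp)
        exact_mod_cast hmM
    have hF2 : PySem.Str.rfind input wd.1 = (M : Int) := by
      have hMle : M ≤ input.toList.length := le_of_lt hMn
      rw [hVgo]
      rcases go_spec input.toList wd.1.toList input.toList.length with ⟨h1, h2⟩ | ⟨m, h1, h2, h3, h4⟩
      · exfalso
        have := h2 M hMle
        rw [← List.isPrefixOf_iff_prefix] at hprefP
        rw [this] at hprefP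
        exact Bool.false_ne_true hprefP
      · rw [h1]
        have hle1 : M ≤ m := by
          by_contra hgt
          push_neg at hgt
          have := h4 M hgt hMle
          rw [← List.isPrefixOf_iff_prefix] at hprefP
          rw [this] at hprefP
          exact Bool.false_ne_true hprefP
        have hle2 : (m : Int) ≤ (M : Int) := by rw [← h1, ← hVgo]; exact hF1 wd hwd
        have : m = M := by omega
        rw [this]
    have hF3 : ∀ w' ∈ altDigits, w' ≠ wd → PySem.Str.rfind input w'.1 < (M : Int) := by
      intro w' hw' hne
      rcases lt_or_eq_of_le (hF1 w' hw') with h | h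
      · exact h
      · exfalso
        rw [hVgo] at h
        rcases go_spec input.toList w'.1.toList input.toList.length with ⟨h1, _⟩ | ⟨m, h1, h2, h3, _⟩
        · rw [h1] at h; omega
        · rw [h1] at h
          have hmM : m = M := by exact_mod_cast h
          subst hmM
          exact hne (match_unique hwd hpref w' hw' (by rw [pvPref_eq]; exact h3))
    obtain ⟨pre, post, hsplit⟩ := List.append_of_mem hwd
    have hnd := words_nodup
    rw [hsplit] at hnd
    have hwdpre : wd ∉ pre := by
      have h1 := List.nodup_middle.mp hnd
      rcases List.nodup_cons.mp h1 with ⟨hnm, _⟩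
      intro hmem
      exact hnm (List.mem_append_left _ hmem)
    have hw9 : (["one","two","three","four","five","six","seven","eight","nine"] : List String)
        = pre.map Prod.fst ++ wd.1 :: post.map Prod.fst := by
      rw [← words_map_fst, hsplit]; simp
    have hmain := A_main (PySem.Str.rfind input) hVge
      (pre.map Prod.fst) (post.map Prod.fst) wd.1 (M : Int) (by omega)
      (by
        intro w hw
        obtain ⟨w', hw', rfl⟩ := List.mem_map.mp hw
        have hmem : w' ∈ altDigits := by rw [hsplit]; exact List.mem_append_left _ hw'
        exact hF3 w' hmem (fun he => hwdpre (he ▸ hw')))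
      hF2
      (by
        intro w hw
        obtain ⟨w', hw', rfl⟩ := List.mem_map.mp hw
        have hmem : w' ∈ altDigits := by
          rw [hsplit]; exact List.mem_append_right _ (List.mem_cons_of_mem _ hw')
        exact hF1 w' hmem)
    have hdig : pvDig input.toList M = some wd.2 := by
      unfold pvDig
      rw [pick_of_unique (p := fun y => pvPref input.toList y.1 M) (x := wd)
        altDigits none (match_unique hwd hpref)]
      have hany : (altDigits.any fun y => pvPref input.toList y.1 M) = true :=
        hit_of_pref hwd hpref
      rw [hany]
      simp
    simp only [getLastWordNumberIndex, hw9, hmain, hdig]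
    have hMpos : ((M : Int) > -1) := by omega
    simp only [hMpos, if_true]
    rw [words_digit wd hwd]
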